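-- pv_equiv track=rewrite | github.com/RicardoNMFilho/AVD | ADBib.py | conaway
-- ===== SOURCE A (Python) =====
-- def conaway(amostra):
--     menor = float("inf")
--     maior = float("-inf")
--
--     for i, elem in enumerate(amostra):
--         if elem < menor:
--             menor = elem
--         if elem > maior:
--             maior = elem
--
--         transiente = False
--         for j in range(i + 1, len(amostra)):
--             if amostra[j] <= menor or amostra[j] >= maior:
--                 transiente = True
--                 break
--
--         if not transiente:
--             return i
--
--     return -1
-- ===== SOURCE B (Python) =====
-- def conaway(amostra):
--     if not amostra:
--         return -1
--     # suffix[k] = (min, max) of amostra[k:], suffix[n] = None; built right-to-left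
--     suffix = [None]
--     for x in reversed(amostra):
--         p = suffix[-1]
--         suffix.append((x, x) if p is None else (min(x, p[0]), max(x, p[1])))
--     suffix.reverse()
--     pmin = pmax = amostra[0]
--     for i, x in enumerate(amostra):
--         pmin = min(pmin, x)
--         pmax = max(pmax, x)
--         nxt = suffix[i + 1]
--         if nxt is None or (nxt[0] > pmin and nxt[1] < pmax):
--             return i
--     return -1
-- ===== Notes on version B (the rewrite author's own statement) =====
-- stated objective: faster
-- what changed: Replaced A's rescan of the whole remaining suffix at every index by a precomputed suffix min/max table, so each index is checked in O(1).
import Mathlib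
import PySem

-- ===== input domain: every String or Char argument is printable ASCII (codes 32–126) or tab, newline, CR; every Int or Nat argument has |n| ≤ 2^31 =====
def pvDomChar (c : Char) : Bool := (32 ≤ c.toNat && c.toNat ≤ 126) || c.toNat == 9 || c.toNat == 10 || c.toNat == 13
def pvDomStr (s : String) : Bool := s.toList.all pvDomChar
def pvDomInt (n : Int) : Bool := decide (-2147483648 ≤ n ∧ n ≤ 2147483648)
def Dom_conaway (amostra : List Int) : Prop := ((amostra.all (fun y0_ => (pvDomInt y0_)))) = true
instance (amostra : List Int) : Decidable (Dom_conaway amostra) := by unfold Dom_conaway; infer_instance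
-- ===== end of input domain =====

-- B replaces A's rescan of the whole remaining suffix at every index by a
-- precomputed suffix min/max table checked in O(1) per index.

-- ===== PORT A =====
-- menor/maior start at float ±inf: modelled as Option Int, none = ±infinity
def pyLtInf (x : Int) (m : Option Int) : Bool :=
  match m with | none => true | some v => x < v
def pyGtNegInf (x : Int) (m : Option Int) : Bool :=
  match m with | none => true | some v => x > v
-- 'amostra[j] <= menor or amostra[j] >= maior' (against ±inf the comparison holds)
def breakCond (menor maior : Option Int) (x : Int) : Bool :=
  (match menor with | none => true | some v => x ≤ v) ||
  (match maior with | none => true | some v => x ≥ v)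

def conawayLoop : List Int → Int → Option Int → Option Int → Int
  | [], _, _, _ => -1
  | elem :: tl, i, menor, maior =>
    let menor := if pyLtInf elem menor then some elem else menor
    let maior := if pyGtNegInf elem maior then some elem else maior
    -- the inner 'for j in range(i+1, …)' with break = any over the remaining list
    let transiente := tl.any (breakCond menor maior)
    if transiente then conawayLoop tl (i + 1) menor maior else i

def conaway (amostra : List Int) : Int := conawayLoop amostra 0 none none

-- ===== PORT B =====
-- suffix table built right-to-left: (sufMM l)[k] = some (min, max of l.drop k), last entry none
def sufMM : List Int → List (Option (Int × Int))
  | [] => [none]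
  | x :: tl =>
    let r := sufMM tl
    (match r.head? with
     | some (some (a, b)) => some (min x a, max x b)
     | _ => some (x, x)) :: r

def altLoop : List Int → List (Option (Int × Int)) → Int → Int → Int → Int
  | [], _, _, _, _ => -1
  | x :: tl, ss, pmin, pmax, i =>
    let pmin := min pmin x
    let pmax := max pmax x
    match ss with
    | [] => i
    | none :: _ => i
    | some (a, b) :: rest =>
      if a > pmin ∧ b < pmax then i else altLoop tl rest pmin pmax (i + 1)

def conaway_alt (amostra : List Int) : Int :=
  match amostra with
  | [] => -1
  | x :: _ => altLoop amostra (sufMM amostra).tail x x 0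

-- ===== PRECONDITION & SPEC =====
def Spec_conaway (amostra : List Int) (out : Int) : Prop := out = conaway_alt amostra
instance (amostra : List Int) (out : Int) : Decidable (Spec_conaway amostra out) := by unfold Spec_conaway; infer_instance

-- ===== CLAIM (what is proved, stated in full; the proofs are below) =====
def Claim_equal_conaway : Prop := ∀ (amostra : List Int), Dom_conaway amostra → Spec_conaway amostra (conaway amostra)

-- ===== LEMMAS AND PROOFS =====

theorem foldl_min_shift (l : List Int) (a b : Int) :
    l.foldl min (min a b) = min a (l.foldl min b) := by
  induction l generalizing b with
  | nil => rfl
  | cons c tl ih => simp [List.foldl, min_assoc, ih]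

theorem foldl_max_shift (l : List Int) (a b : Int) :
    l.foldl max (max a b) = max a (l.foldl max b) := by
  induction l generalizing b with
  | nil => rfl
  | cons c tl ih => simp [List.foldl, max_assoc, ih]

theorem sufMM_head (x : Int) (tl : List Int) :
    (sufMM (x :: tl)).head? = some (some (tl.foldl min x, tl.foldl max x)) := by
  induction tl generalizing x with
  | nil => rfl
  | cons y tl' ih =>
    have h1 : sufMM (x :: y :: tl') =
        (match (sufMM (y :: tl')).head? with
         | some (some (a, b)) => some (min x a, max x b)
         | _ => some (x, x)) :: sufMM (y :: tl') := rfl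
    rw [h1, List.head?_cons, ih y]
    simp [List.foldl, foldl_min_shift tl' x y, foldl_max_shift tl' x y]

theorem sufMM_cons (y : Int) (tl' : List Int) :
    sufMM (y :: tl') = some (tl'.foldl min y, tl'.foldl max y) :: sufMM tl' := by
  have h1 : sufMM (y :: tl') =
      (match (sufMM tl').head? with
       | some (some (a, b)) => some (min y a, max y b)
       | _ => some (y, y)) :: sufMM tl' := rfl
  have h2 := sufMM_head y tl'
  rw [h1] at h2 ⊢
  rw [List.head?_cons, Option.some.injEq] at h2
  rw [h2]

theorem lt_foldl_min (l : List Int) (y m : Int) :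
    m < l.foldl min y ↔ m < y ∧ ∀ z ∈ l, m < z := by
  induction l generalizing y with
  | nil => simp
  | cons c tl ih =>
    simp only [List.foldl, ih, lt_min_iff, List.mem_cons]
    constructor
    · rintro ⟨⟨h1, h2⟩, h3⟩; exact ⟨h1, fun z hz => hz.elim (fun e => e ▸ h2) (h3 z)⟩
    · rintro ⟨h1, h2⟩; exact ⟨⟨h1, h2 c (Or.inl rfl)⟩, fun z hz => h2 z (Or.inr hz)⟩

theorem foldl_max_lt (l : List Int) (y M : Int) :
    l.foldl max y < M ↔ y < M ∧ ∀ z ∈ l, z < M := by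
  induction l generalizing y with
  | nil => simp
  | cons c tl ih =>
    simp only [List.foldl, ih, max_lt_iff, List.mem_cons]
    constructor
    · rintro ⟨⟨h1, h2⟩, h3⟩; exact ⟨h1, fun z hz => hz.elim (fun e => e ▸ h2) (h3 z)⟩
    · rintro ⟨h1, h2⟩; exact ⟨⟨h1, h2 c (Or.inl rfl)⟩, fun z hz => h2 z (Or.inr hz)⟩

theorem breakCond_false (m M z : Int) :
    ¬ (breakCond (some m) (some M) z = true) ↔ (m < z ∧ z < M) := by
  simp only [breakCond, Bool.or_eq_true, decide_eq_true_eq, not_or]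
  omega

-- A's inner scan over a nonempty suffix finds no break iff the suffix min/max
-- lie strictly inside the current prefix bounds
theorem cond_false_iff (y : Int) (tl : List Int) (m M : Int) :
    ((y :: tl).any (breakCond (some m) (some M)) = false) ↔
      (m < tl.foldl min y ∧ tl.foldl max y < M) := by
  simp only [List.any_eq_false, breakCond_false, lt_foldl_min, foldl_max_lt, List.mem_cons]
  constructor
  · intro h
    exact ⟨⟨(h y (Or.inl rfl)).1, fun z hz => (h z (Or.inr hz)).1⟩,
           (h y (Or.inl rfl)).2, fun z hz => (h z (Or.inr hz)).2⟩
  · rintro ⟨⟨h1, h2⟩, h3, h4⟩ z hz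
    rcases hz with rfl | hz
    · exact ⟨h1, h3⟩
    · exact ⟨h2 z hz, h4 z hz⟩

-- the common loop body: A's if-on-any equals B's table lookup, given the
-- recursive continuation agreement
theorem step_eq (tl : List Int) (i m M : Int)
    (ihc : conawayLoop tl (i + 1) (some m) (some M) = altLoop tl (sufMM tl).tail m M (i + 1)) :
    (if tl.any (breakCond (some m) (some M)) then conawayLoop tl (i + 1) (some m) (some M) else i)
      = (match sufMM tl with
         | [] => i
         | none :: _ => i
         | some (a, b) :: rest => if a > m ∧ b < M then i else altLoop tl rest m M (i + 1)) := by
  cases tl with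
  | nil => simp [sufMM]
  | cons y tl' =>
    rw [sufMM_cons]
    show _ = (if tl'.foldl min y > m ∧ tl'.foldl max y < M then i
              else altLoop (y :: tl') (sufMM tl') m M (i + 1))
    by_cases hc : (tl'.foldl min y > m ∧ tl'.foldl max y < M)
    · rw [if_pos hc, (cond_false_iff y tl' m M).mpr ⟨hc.1, hc.2⟩]
      simp
    · have hany : (y :: tl').any (breakCond (some m) (some M)) = true := by
        rcases Bool.eq_false_or_eq_true ((y :: tl').any (breakCond (some m) (some M))) with h | h
        · exact h
        · exact absurd ((cond_false_iff y tl' m M).mp h) (fun h' => hc ⟨h'.1, h'.2⟩)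
      rw [hany, if_pos rfl, if_neg hc, ihc, sufMM_cons, List.tail_cons]

theorem loops_eq (l : List Int) : ∀ (i pmin pmax : Int),
    conawayLoop l i (some pmin) (some pmax) = altLoop l (sufMM l).tail pmin pmax i := by
  induction l with
  | nil => intro i pmin pmax; rfl
  | cons x tl ih =>
    intro i pmin pmax
    have hm : (if pyLtInf x (some pmin) then some x else some pmin)
        = some (min pmin x) := by
      by_cases h : x < pmin
      · rw [if_pos (by simp [pyLtInf, h]), min_eq_right h.le]
      · rw [if_neg (by simp [pyLtInf]; omega), min_eq_left (by omega)]
    have hM : (if pyGtNegInf x (some pmax) then some x else some pmax)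
        = some (max pmax x) := by
      by_cases h : x > pmax
      · rw [if_pos (by simp [pyGtNegInf, h]), max_eq_right h.le]
      · rw [if_neg (by simp [pyGtNegInf]; omega), max_eq_left (by omega)]
    show (if (tl.any (breakCond (if pyLtInf x (some pmin) then some x else some pmin)
                                (if pyGtNegInf x (some pmax) then some x else some pmax)))
          then conawayLoop tl (i + 1) (if pyLtInf x (some pmin) then some x else some pmin)
                                      (if pyGtNegInf x (some pmax) then some x else some pmax)
          else i) = _
    rw [hm, hM]
    have htail : (sufMM (x :: tl)).tail = sufMM tl := by
      rw [sufMM_cons, List.tail_cons]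
    rw [htail]
    show _ = (match sufMM tl with
              | [] => i
              | none :: _ => i
              | some (a, b) :: rest =>
                if a > min pmin x ∧ b < max pmax x then i
                else altLoop tl rest (min pmin x) (max pmax x) (i + 1))
    exact step_eq tl i (min pmin x) (max pmax x) (ih (i + 1) (min pmin x) (max pmax x))

-- ===== VERDICT (by name: the statement is the Claim_ definition above) =====
theorem conaway_spec : Claim_equal_conaway := by
  intro amostra _
  unfold Spec_conaway conaway conaway_alt
  cases amostra with
  | nil => rfl
  | cons x tl =>
    show conawayLoop (x :: tl) 0 none none = altLoop (x :: tl) (sufMM (x :: tl)).tail x x 0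
    have htail : (sufMM (x :: tl)).tail = sufMM tl := by
      rw [sufMM_cons, List.tail_cons]
    rw [htail]
    show (if (tl.any (breakCond (if pyLtInf x none then some x else none)
                                (if pyGtNegInf x none then some x else none)))
          then conawayLoop tl (0 + 1) (if pyLtInf x none then some x else none)
                                      (if pyGtNegInf x none then some x else none)
          else 0) = _
    have hpy : (if pyLtInf x none then some x else none) = some x := by rfl
    have hpy2 : (if pyGtNegInf x none then some x else none) = some x := by rfl
    rw [hpy, hpy2]
    show _ = (match sufMM tl with
              | [] => (0 : Int)
              | none :: _ => 0
              | some (a, b) :: rest =>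
                if a > min x x ∧ b < max x x then 0
                else altLoop tl rest (min x x) (max x x) (0 + 1))
    rw [min_self, max_self]
    exact step_eq tl 0 x x (loops_eq tl (0 + 1) x x)
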